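-- pv_equiv track=rewrite | github.com/TJU-work/DDIPred | MSKG-DDI_Binary/utils/data_preparation.py | create_dataset_task1
-- ===== SOURCE A (Python) =====
-- def create_dataset_task1(all_ids: list, all_data:list, k: int):
--     dataset = dict()
--     remain = set(range(0, len(all_data) - 1))
--     size = int(len(all_data)/k)
--     i = 0
--     temp = []
--     for id in all_ids:
--         for j in remain:
--             if all_data[j][0]==id  or  all_data[j][1]==id:
--                 temp.append(j)
--         remain = remain.difference(temp)
--
--         if len(temp) > size:
--             dataset[i] = set(temp)
--             i+=1
--             temp.clear()
--             if (i==k-1):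
--                 dataset[i]=remain
--                 return dataset
--     return dataset
-- ===== SOURCE B (Python) =====
-- def create_dataset_task1(all_ids: list, all_data: list, k: int):
--     # Counting-sort style: assign each considered row to the FIRST id in all_ids
--     # that mentions it, bucket rows by that position, then one sweep over positions.
--     n = len(all_data) - 1
--     size = int(len(all_data) / k)
--     m = len(all_ids)
--     order = {}
--     for t, id in enumerate(all_ids):
--         if id not in order:
--             order[id] = t
--     owner = []
--     buckets = [[] for _ in range(m + 1)]
--     for j in range(n):
--         t = min(order.get(all_data[j][0], m), order.get(all_data[j][1], m))
--         owner.append(t)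
--         buckets[t].append(j)
--     dataset = {}
--     i = 0
--     temp = []
--     for t in range(m):
--         temp = temp + buckets[t]
--         if len(temp) > size:
--             dataset[i] = set(temp)
--             i += 1
--             temp = []
--             if i == k - 1:
--                 dataset[i] = set(j for j in range(n) if owner[j] > t)
--                 return dataset
--     return dataset
-- ===== Notes on version B (the rewrite author's own statement) =====
-- stated objective: faster
-- what changed: B assigns each row once to the first id mentioning it (a first-occurrence position dict plus counting-sort style buckets) and then builds the folds in a single sweep over positions, instead of A's per-id rescan of the whole remaining index set.
-- outside the precondition, e.g. on create_dataset_task1([1], [(1, 2)], 0): A raises ZeroDivisionError, B raises ZeroDivisionError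
import Mathlib
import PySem

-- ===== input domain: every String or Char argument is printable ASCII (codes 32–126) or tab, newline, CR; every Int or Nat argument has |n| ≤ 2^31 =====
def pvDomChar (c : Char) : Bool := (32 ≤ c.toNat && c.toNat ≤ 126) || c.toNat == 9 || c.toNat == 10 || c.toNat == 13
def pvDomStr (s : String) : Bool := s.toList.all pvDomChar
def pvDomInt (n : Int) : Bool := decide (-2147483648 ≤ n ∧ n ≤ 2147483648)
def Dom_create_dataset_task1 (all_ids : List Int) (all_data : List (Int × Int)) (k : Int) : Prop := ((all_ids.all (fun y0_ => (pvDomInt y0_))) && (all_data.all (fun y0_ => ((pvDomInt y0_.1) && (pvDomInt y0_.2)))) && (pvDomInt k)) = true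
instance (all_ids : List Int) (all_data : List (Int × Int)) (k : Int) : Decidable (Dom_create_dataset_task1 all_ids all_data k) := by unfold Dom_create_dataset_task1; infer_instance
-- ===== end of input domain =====

-- B replaces A's per-id rescan of the remaining index set by a counting-sort style grouping:
-- each row is assigned to the FIRST id mentioning it, rows are bucketed by that position,
-- and one sweep over positions builds the folds (objective: faster, asymptotic).

-- ===== PORT A =====
-- does all_data[j][0]==id or all_data[j][1]==id  (j is always a valid index when reached, so the default is never used)
def pvMatch (all_data : List (Int × Int)) (id j : Int) : Bool :=
  (PySem.List.pyGetD all_data j (0, 0)).1 == id || (PySem.List.pyGetD all_data j (0, 0)).2 == id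

-- the 'for id in all_ids' loop of A with its state (dataset, remain, i, temp); early return on i==k-1
def pvA_loop (all_data : List (Int × Int)) (k size : Int) :
    List Int → List (Int × List Int) → List Int → Int → List Int → List (Int × List Int)
  | [], dataset, _remain, _i, _temp => dataset
  | id :: ids, dataset, remain, i, temp =>
    let temp2 := temp ++ remain.filter (pvMatch all_data id)          -- inner 'for j in remain' scan
    let remain2 := remain.filter (fun x => !temp2.contains x)         -- remain.difference(temp)
    if (temp2.length : Int) > size then
      if i + 1 == k - 1 then
        (dataset ++ [(i, PySem.Set.ofList temp2)]) ++ [(i + 1, remain2)]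
      else
        pvA_loop all_data k size ids (dataset ++ [(i, PySem.Set.ofList temp2)]) remain2 (i + 1) []
    else
      pvA_loop all_data k size ids dataset remain2 i temp2

-- size = int(len(all_data)/k): truncated division, exact for list lengths (< 2^53, float-exact)
def create_dataset_task1 (all_ids : List Int) (all_data : List (Int × Int)) (k : Int) : List (Int × List Int) :=
  pvA_loop all_data k (Int.tdiv (all_data.length : Int) k) all_ids []
    (PySem.List.pyRange 0 ((all_data.length : Int) - 1) 1) 0 []

-- ===== PORT B =====
-- 'for t, id in enumerate(all_ids): if id not in order: order[id] = t' (counter carried explicitly)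
def pvOrder : List Int → Int → PySem.Dict Int Int → PySem.Dict Int Int
  | [], _, d => d
  | id :: ids, t, d => pvOrder ids (t + 1) (if d.contains id then d else d.insert id t)

-- 'for j in range(n): t = min(order.get(a, m), order.get(b, m)); owner.append(t); buckets[t].append(j)'
-- (buckets[t] assignment via pySetD; t is always in range [0, m], so it is exact here)
def pvBuild (ord : PySem.Dict Int Int) (all_data : List (Int × Int)) (m : Int) :
    List Int → List Int × List (List Int) → List Int × List (List Int)
  | [], st => st
  | j :: js, (owner, buckets) =>
    let p := PySem.List.pyGetD all_data j (0, 0)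
    let t := min (ord.getD p.1 m) (ord.getD p.2 m)
    pvBuild ord all_data m js
      (owner ++ [t], PySem.List.pySetD buckets t (PySem.List.pyGetD buckets t [] ++ [j]))

-- 'for t in range(m)' sweep with state (dataset, i, temp); on the early return the last fold is
-- the rows whose owning position lies strictly after t (Python: set(j for j in range(n) if owner[j] > t))
def pvB_main (owner : List Int) (buckets : List (List Int)) (n k size : Int) :
    List Int → List (Int × List Int) → Int → List Int → List (Int × List Int)
  | [], dataset, _i, _temp => dataset
  | t :: ts, dataset, i, temp =>
    let temp2 := temp ++ PySem.List.pyGetD buckets t []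
    if (temp2.length : Int) > size then
      if i + 1 == k - 1 then
        (dataset ++ [(i, PySem.Set.ofList temp2)]) ++
          [(i + 1, PySem.Set.ofList ((PySem.List.pyRange 0 n 1).filter
              (fun j => PySem.List.pyGetD owner j 0 > t)))]
      else
        pvB_main owner buckets n k size ts (dataset ++ [(i, PySem.Set.ofList temp2)]) (i + 1) []
    else
      pvB_main owner buckets n k size ts dataset i temp2

def create_dataset_task1_alt (all_ids : List Int) (all_data : List (Int × Int)) (k : Int) : List (Int × List Int) :=
  let n := (all_data.length : Int) - 1
  let size := Int.tdiv (all_data.length : Int) k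
  let m := (all_ids.length : Int)
  let ord := pvOrder all_ids 0 PySem.Dict.empty
  let st := pvBuild ord all_data m (PySem.List.pyRange 0 n 1) ([], List.replicate (m.toNat + 1) [])
  pvB_main st.1 st.2 n k size (PySem.List.pyRange 0 m 1) [] 0 []

-- ===== PRECONDITION & SPEC =====
-- Pre_ excludes only k = 0, where A (and B) raise ZeroDivisionError in 'int(len(all_data)/k)'.
def Pre_create_dataset_task1 (_all_ids : List Int) (_all_data : List (Int × Int)) (k : Int) : Prop := k ≠ 0
instance (all_ids : List Int) (all_data : List (Int × Int)) (k : Int) : Decidable (Pre_create_dataset_task1 all_ids all_data k) := by unfold Pre_create_dataset_task1; infer_instance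
def pvWitness_create_dataset_task1 : List Int × (List (Int × Int)) × Int := ([1, 2], [(1, 2), (2, 3), (1, 3)], 2)

def Spec_create_dataset_task1 (all_ids : List Int) (all_data : List (Int × Int)) (k : Int) (out : List (Int × List Int)) : Prop := out = create_dataset_task1_alt all_ids all_data k
instance (all_ids : List Int) (all_data : List (Int × Int)) (k : Int) (out : List (Int × List Int)) : Decidable (Spec_create_dataset_task1 all_ids all_data k out) := by unfold Spec_create_dataset_task1; infer_instance

-- ===== CLAIM (what is proved, stated in full; the proofs are below) =====
def Claim_equal_create_dataset_task1 : Prop := ∀ (all_ids : List Int) (all_data : List (Int × Int)) (k : Int), Dom_create_dataset_task1 all_ids all_data k → Pre_create_dataset_task1 all_ids all_data k → Spec_create_dataset_task1 all_ids all_data k (create_dataset_task1 all_ids all_data k)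

-- ===== LEMMAS AND PROOFS =====

-- the owning position of row j: index of the first id in all_ids mentioning it (= all_ids.length if none)
def pvOwnerF (all_ids : List Int) (all_data : List (Int × Int)) (j : Int) : Int :=
  min ((all_ids.idxOf (PySem.List.pyGetD all_data j (0, 0)).1 : Int))
      ((all_ids.idxOf (PySem.List.pyGetD all_data j (0, 0)).2 : Int))

theorem pvOwnerF_nonneg (all_ids : List Int) (all_data : List (Int × Int)) (j : Int) :
    0 ≤ pvOwnerF all_ids all_data j := by
  unfold pvOwnerF; exact le_min (Int.natCast_nonneg _) (Int.natCast_nonneg _)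

theorem pvOwnerF_le (all_ids : List Int) (all_data : List (Int × Int)) (j : Int) :
    pvOwnerF all_ids all_data j ≤ (all_ids.length : Int) := by
  unfold pvOwnerF
  exact le_trans (min_le_left _ _) (by exact_mod_cast List.idxOf_le_length)

theorem pvSetD_length {α : Type} (xs : List α) (i : Int) (v : α) :
    (PySem.List.pySetD xs i v).length = xs.length := by
  unfold PySem.List.pySetD PySem.List.pySet?
  rcases h : PySem.List.pyIdx? xs.length i with _ | j <;> simp

theorem pvOrder_getD (dflt : Int) : ∀ (l : List Int) (t : Int) (d : PySem.Dict Int Int) (id : Int),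
    (pvOrder l t d).getD id dflt =
      if d.contains id then d.getD id dflt
      else if id ∈ l then t + (l.idxOf id : Int) else dflt := by
  intro l
  induction l with
  | nil =>
    intro t d id
    simp only [pvOrder, List.not_mem_nil, if_false]
    by_cases hc : d.contains id = true
    · simp [hc]
    · simp [hc, PySem.Dict.getD_of_not_contains d dflt (by simpa using hc)]
  | cons x xs ih =>
    intro t d id
    simp only [pvOrder, ih, List.mem_cons, List.idxOf_cons]
    by_cases hx : d.contains x = true
    · rw [if_pos hx]
      by_cases hc : d.contains id = true
      · simp [hc]
      · have hix : id ≠ x := fun h => hc (h ▸ hx)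
        simp only [hc, Bool.false_eq_true, if_false, hix, false_or, beq_iff_eq, Ne.symm hix]
        by_cases hm : id ∈ xs
        · have hbeq : (x == id) = false := by simp [Ne.symm hix]
          simp only [hm, if_true, hbeq, Bool.cond_false]; push_cast; ring
        · simp [hm]
    · rw [if_neg hx]
      by_cases hix : id = x
      · subst hix
        have hcf : d.contains id = false := by simpa using hx
        simp [PySem.Dict.contains_insert, PySem.Dict.getD_insert, hcf]
      · have h1 : (d.insert x t).contains id = d.contains id := by
          simp [PySem.Dict.contains_insert, hix]
        have h2 : (d.insert x t).getD id dflt = d.getD id dflt := by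
          simp [PySem.Dict.getD_insert, hix]
        rw [h1, h2]
        by_cases hc : d.contains id = true
        · simp [hc]
        · simp only [hc, Bool.false_eq_true, if_false, List.mem_cons, hix, false_or,
            beq_iff_eq, Ne.symm hix, if_false]
          by_cases hm : id ∈ xs
          · have hbeq : (x == id) = false := by rw [beq_eq_false_iff_ne]; exact fun h => hix h.symm
            simp only [hm, if_true, hbeq, Bool.cond_false]; push_cast; ring
          · simp [hm]

theorem pvOrder_top (all_ids : List Int) (id : Int) :
    (pvOrder all_ids 0 PySem.Dict.empty).getD id (all_ids.length : Int) = (all_ids.idxOf id : Int) := by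
  rw [pvOrder_getD]
  simp only [PySem.Dict.contains_empty, Bool.false_eq_true, if_false, zero_add]
  by_cases h : id ∈ all_ids
  · simp [h]
  · simp [h, List.idxOf_eq_length_iff.mpr h]

-- idxOf of the element at position i is ≤ i
theorem pvIdxOf_getElem_le {l : List Int} : ∀ (i : Nat) (h : i < l.length), l.idxOf l[i] ≤ i := by
  induction l with
  | nil => intro i h; simp at h
  | cons x xs ih =>
    intro i h
    cases i with
    | zero => simp [List.idxOf_cons]
    | succ i =>
      have hi : i < xs.length := by simpa using h
      rw [List.getElem_cons_succ, List.idxOf_cons]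
      by_cases hx : (x == xs[i]) = true
      · simp [hx]
      · simp only [Bool.not_eq_true] at hx
        rw [hx]
        simp only [Bool.cond_false]
        have := ih i hi
        omega

-- match characterisation: for a row still unowned at position t, matching all_ids[t] ↔ owner = t
theorem pvMatch_iff_owner (all_ids : List Int) (all_data : List (Int × Int)) (j : Int)
    (t : Nat) (ht : t < all_ids.length) (hge : (t : Int) ≤ pvOwnerF all_ids all_data j) :
    pvMatch all_data all_ids[t] j = true ↔ pvOwnerF all_ids all_data j = (t : Int) := by
  set p := PySem.List.pyGetD all_data j (0, 0) with hp
  constructor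
  · intro hm
    have hle : pvOwnerF all_ids all_data j ≤ (t : Int) := by
      unfold pvOwnerF
      rcases (by simpa [pvMatch, ← hp] using hm : p.1 = all_ids[t] ∨ p.2 = all_ids[t]) with h | h
      · refine le_trans (min_le_left _ _) ?_
        rw [h]; exact_mod_cast pvIdxOf_getElem_le t ht
      · refine le_trans (min_le_right _ _) ?_
        rw [h]; exact_mod_cast pvIdxOf_getElem_le t ht
    omega
  · intro heq
    unfold pvOwnerF at heq
    rcases min_cases ((all_ids.idxOf p.1 : Int)) ((all_ids.idxOf p.2 : Int)) with ⟨h1, _⟩ | ⟨h1, _⟩ <;>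
      rw [h1] at heq
    · have hidx : all_ids.idxOf p.1 = t := by exact_mod_cast heq
      have hmem : all_ids.idxOf p.1 < all_ids.length := hidx ▸ ht
      have h2 : all_ids[t]? = some p.1 := by
        rw [← hidx, List.getElem?_eq_getElem hmem, List.getElem_idxOf hmem]
      have h3 : all_ids[t] = p.1 := by
        rw [List.getElem?_eq_getElem ht] at h2; exact Option.some.inj h2
      simp [pvMatch, ← hp, h3]
    · have hidx : all_ids.idxOf p.2 = t := by exact_mod_cast heq
      have hmem : all_ids.idxOf p.2 < all_ids.length := hidx ▸ ht
      have h2 : all_ids[t]? = some p.2 := by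
        rw [← hidx, List.getElem?_eq_getElem hmem, List.getElem_idxOf hmem]
      have h3 : all_ids[t] = p.2 := by
        rw [List.getElem?_eq_getElem ht] at h2; exact Option.some.inj h2
      simp [pvMatch, ← hp, h3]

-- the owner list built by pvBuild is the map of pvOwnerF
theorem pvBuild_fst (all_ids : List Int) (all_data : List (Int × Int)) :
    ∀ (js : List Int) (owner : List Int) (buckets : List (List Int)),
      (pvBuild (pvOrder all_ids 0 PySem.Dict.empty) all_data (all_ids.length : Int) js (owner, buckets)).1
        = owner ++ js.map (pvOwnerF all_ids all_data) := by
  intro js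
  induction js with
  | nil => intro owner buckets; simp [pvBuild]
  | cons j js ih =>
    intro owner buckets
    simp only [pvBuild, ih, List.map_cons]
    rw [List.append_assoc, List.singleton_append]
    congr 2
    simp [pvOrder_top, pvOwnerF]

-- the buckets built by pvBuild: bucket t = rows with owner = t, in order
theorem pvBuild_snd (all_ids : List Int) (all_data : List (Int × Int)) :
    ∀ (js : List Int) (owner : List Int) (buckets : List (List Int))
      (hlen : buckets.length = all_ids.length + 1) (t : Nat)
      (htm : t ≤ all_ids.length),
      PySem.List.pyGetD
        (pvBuild (pvOrder all_ids 0 PySem.Dict.empty) all_data (all_ids.length : Int) js (owner, buckets)).2 (t : Int) []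
        = PySem.List.pyGetD buckets (t : Int) [] ++ js.filter (fun j => pvOwnerF all_ids all_data j == (t : Int)) := by
  intro js
  induction js with
  | nil => intro owner buckets _ t _; simp [pvBuild]
  | cons j js ih =>
    intro owner buckets hlen t htm
    have howner : min ((pvOrder all_ids 0 PySem.Dict.empty).getD (PySem.List.pyGetD all_data j (0, 0)).1 (all_ids.length : Int))
        ((pvOrder all_ids 0 PySem.Dict.empty).getD (PySem.List.pyGetD all_data j (0, 0)).2 (all_ids.length : Int))
        = pvOwnerF all_ids all_data j := by
      simp [pvOrder_top, pvOwnerF]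
    have h0 := pvOwnerF_nonneg all_ids all_data j
    have h1 := pvOwnerF_le all_ids all_data j
    have hnat : pvOwnerF all_ids all_data j = ((pvOwnerF all_ids all_data j).toNat : Int) := by omega
    have hlt : (pvOwnerF all_ids all_data j).toNat < buckets.length := by omega
    simp only [pvBuild, howner]
    rw [hnat, ih _ _ (by rw [pvSetD_length]; exact hlen) t htm]
    rw [PySem.List.pyGetD_pySetD_natCast _ _ _ _ _ hlt]
    rw [List.filter_cons]
    by_cases he : (pvOwnerF all_ids all_data j).toNat = t
    · subst he
      simp [← hnat, List.append_assoc]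
    · have hne : t ≠ (pvOwnerF all_ids all_data j).toNat := Ne.symm he
      have hne2 : ¬ (pvOwnerF all_ids all_data j == (t : Int)) = true := by
        simp; omega
      simp [hne, hne2, ← hnat]

-- main loop correspondence: A over the id-suffix from position t = B over positions [t, m)
theorem pvAB (all_ids : List Int) (all_data : List (Int × Int)) (k size n : Int)
    (owner : List Int) (buckets : List (List Int))
    (howner : owner = (PySem.List.pyRange 0 n 1).map (pvOwnerF all_ids all_data))
    (hbuckets : ∀ t : Nat, t ≤ all_ids.length →
      PySem.List.pyGetD buckets (t : Int) [] =
        (PySem.List.pyRange 0 n 1).filter (fun j => pvOwnerF all_ids all_data j == (t : Int))) :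
    ∀ (suffix : List Int) (t : Nat), suffix = all_ids.drop t →
      ∀ (dataset : List (Int × List Int)) (i : Int) (temp : List Int),
      (∀ x ∈ temp, pvOwnerF all_ids all_data x < (t : Int)) →
      pvA_loop all_data k size suffix dataset
        ((PySem.List.pyRange 0 n 1).filter (fun j => decide ((t : Int) ≤ pvOwnerF all_ids all_data j)))
        i temp
      = pvB_main owner buckets n k size (PySem.List.pyRange (t : Int) (all_ids.length : Int) 1)
          dataset i temp := by
  intro suffix
  induction suffix with
  | nil =>
    intro t hsuf dataset i temp _
    have hge : all_ids.length ≤ t := by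
      by_contra h
      have := List.drop_eq_nil_iff.mp hsuf.symm
      omega
    rw [show PySem.List.pyRange (t : Int) (all_ids.length : Int) 1 = []
        from PySem.List.pyRange_one_eq_nil (by exact_mod_cast hge)]
    simp [pvA_loop, pvB_main]
  | cons id ids ih =>
    intro t hsuf dataset i temp htemp
    have htl : t < all_ids.length := by
      by_contra h
      rw [List.drop_eq_nil_iff.mpr (by omega)] at hsuf; simp at hsuf
    have hid : all_ids[t] = id := by
      have h0 : (all_ids.drop t)[0]? = some id := by rw [← hsuf]; rfl
      rw [List.getElem?_drop, Nat.add_zero, List.getElem?_eq_getElem htl] at h0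
      exact Option.some.inj h0
    have hids : ids = all_ids.drop (t + 1) := by
      have h := congrArg List.tail hsuf
      simpa [List.tail_drop] using h
    rw [show PySem.List.pyRange (t : Int) (all_ids.length : Int) 1
          = (t : Int) :: PySem.List.pyRange ((t : Int) + 1) (all_ids.length : Int) 1
        from PySem.List.pyRange_one_cons (by exact_mod_cast htl)]
    -- the rows A adds to temp at this step are exactly bucket t
    have e1 : ((PySem.List.pyRange 0 n 1).filter
          (fun j => decide ((t : Int) ≤ pvOwnerF all_ids all_data j))).filter (pvMatch all_data id)
        = PySem.List.pyGetD buckets (t : Int) [] := by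
      rw [hbuckets t (le_of_lt htl), List.filter_filter]
      apply List.filter_congr
      intro j _
      by_cases hge : (t : Int) ≤ pvOwnerF all_ids all_data j
      · have hiff := pvMatch_iff_owner all_ids all_data j t htl hge
        rw [hid] at hiff
        by_cases hm : pvMatch all_data id j = true
        · simp [hm, hge, hiff.mp hm]
        · have : ¬ pvOwnerF all_ids all_data j = (t : Int) := fun h => hm (hiff.mpr h)
          simp [hm, hge, this]
      · have hne : ¬ pvOwnerF all_ids all_data j = (t : Int) := by omega
        simp [hge, hne]
    -- the remaining rows after this step are those owned strictly later
    have e2 : ∀ tmp : List Int, (∀ x ∈ tmp, pvOwnerF all_ids all_data x < (t : Int)) →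
        ((PySem.List.pyRange 0 n 1).filter
          (fun j => decide ((t : Int) ≤ pvOwnerF all_ids all_data j))).filter
            (fun x => !(tmp ++ PySem.List.pyGetD buckets (t : Int) []).contains x)
        = (PySem.List.pyRange 0 n 1).filter
            (fun j => decide (((t : Int) + 1) ≤ pvOwnerF all_ids all_data j)) := by
      intro tmp htmp
      rw [List.filter_filter]
      apply List.filter_congr
      intro j hj
      have hbk : j ∈ PySem.List.pyGetD buckets (t : Int) [] ↔
          pvOwnerF all_ids all_data j = (t : Int) := by
        rw [hbuckets t (le_of_lt htl), List.mem_filter]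
        simp [hj]
      set Bk := PySem.List.pyGetD buckets (t : Int) [] with hB
      by_cases hge : (t : Int) ≤ pvOwnerF all_ids all_data j
      · have hnt : j ∉ tmp := fun h => by have := htmp j h; omega
        by_cases he : pvOwnerF all_ids all_data j = (t : Int)
        · simp [hge, hnt, hbk, he]
        · have : (t : Int) + 1 ≤ pvOwnerF all_ids all_data j := by omega
          simp [hge, hnt, hbk, he, this]
      · have : ¬ ((t : Int) + 1 ≤ pvOwnerF all_ids all_data j) := by omega
        simp [hge, this]
    -- the early-return tail fold: A's remaining set = B's owner-indexed filter
    have e3 : ((PySem.List.pyRange 0 n 1).filter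
          (fun j => decide (((t : Int) + 1) ≤ pvOwnerF all_ids all_data j)))
        = PySem.Set.ofList ((PySem.List.pyRange 0 n 1).filter
            (fun j => PySem.List.pyGetD owner j 0 > (t : Int))) := by
      have hf : ((PySem.List.pyRange 0 n 1).filter
            (fun j => PySem.List.pyGetD owner j 0 > (t : Int)))
          = (PySem.List.pyRange 0 n 1).filter
              (fun j => decide (((t : Int) + 1) ≤ pvOwnerF all_ids all_data j)) := by
        apply List.filter_congr
        intro j hj
        have hjr := PySem.List.mem_pyRange_one.mp hj
        rw [howner, PySem.List.pyGetD_map_pyRange_of_nonneg _ _ _ _ hjr.1 hjr.2]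
        by_cases h : (t : Int) + 1 ≤ pvOwnerF all_ids all_data j
        · simp [h, show pvOwnerF all_ids all_data j > (t : Int) by omega]
        · simp [h, show ¬ pvOwnerF all_ids all_data j > (t : Int) by omega]
      rw [hf, PySem.Set.ofList_eq_self_of_nodup _ ((PySem.List.nodup_pyRange_one 0 n).filter _)]
    have hcast : ((t : Int) + 1) = (((t + 1 : Nat)) : Int) := by push_cast; ring
    simp only [pvA_loop, pvB_main, e1]
    split_ifs with h1 h2
    · rw [e2 temp htemp, e3]
    · rw [e2 temp htemp, hcast]
      exact ih (t + 1) hids _ _ [] (by simp)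
    · rw [e2 temp htemp, hcast]
      refine ih (t + 1) hids _ _ _ ?_
      intro x hx
      rcases List.mem_append.mp hx with h | h
      · have := htemp x h; push_cast; omega
      · have : pvOwnerF all_ids all_data x = (t : Int) := by
          have hb := (hbuckets t (le_of_lt htl)) ▸ h
          exact by simpa using (List.mem_filter.mp hb).2
        push_cast; omega

-- ===== VERDICT (by name: the statement is the Claim_ definition above) =====
theorem create_dataset_task1_spec : Claim_equal_create_dataset_task1 := by
  intro all_ids all_data k _hdom _hpre
  unfold Spec_create_dataset_task1 create_dataset_task1 create_dataset_task1_alt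
  set n : Int := (all_data.length : Int) - 1 with hn
  set st := pvBuild (pvOrder all_ids 0 PySem.Dict.empty) all_data (all_ids.length : Int)
      (PySem.List.pyRange 0 n 1) ([], List.replicate (all_ids.length + 1) []) with hst
  have howner : st.1 = (PySem.List.pyRange 0 n 1).map (pvOwnerF all_ids all_data) := by
    rw [hst, pvBuild_fst]; simp
  have hbuckets : ∀ t : Nat, t ≤ all_ids.length →
      PySem.List.pyGetD st.2 (t : Int) [] =
        (PySem.List.pyRange 0 n 1).filter (fun j => pvOwnerF all_ids all_data j == (t : Int)) := by
    intro t htm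
    rw [hst, pvBuild_snd all_ids all_data _ _ _ (by simp) t htm]
    have hrep : PySem.List.pyGetD (List.replicate (all_ids.length + 1) ([] : List Int)) (t : Int) [] = [] := by
      rw [PySem.List.pyGetD_eq_getElem _ _ (by positivity) (by simp; omega)]
      simp
    rw [hrep, List.nil_append]
  have hr : PySem.List.pyRange 0 n 1
      = (PySem.List.pyRange 0 n 1).filter
          (fun j => decide (((0 : Nat) : Int) ≤ pvOwnerF all_ids all_data j)) := by
    symm
    apply List.filter_eq_self.mpr
    intro j _
    simpa using pvOwnerF_nonneg all_ids all_data j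
  have hmain := pvAB all_ids all_data k (Int.tdiv (all_data.length : Int) k) n st.1 st.2
    howner hbuckets all_ids 0 (by simp) [] 0 [] (by simp)
  simp only [Nat.cast_zero] at hmain
  rw [hr]
  -- the replicate argument in the definition of B uses (m.toNat + 1); identify it
  have hm : ((all_ids.length : Int)).toNat = all_ids.length := by simp
  simp only [hm] at *
  exact hr ▸ hmain
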